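-- pv_equiv track=rewrite | github.com/rochmanofenna/ryguy-ai | benchmarks/quick_maze_benchmark.py | _fusion_select
-- ===== SOURCE A (Python) =====
-- def _fusion_select(paths, compressed_state):
--     """FusionAlpha: Select best path using compressed knowledge"""
--     if compressed_state is None:
--         return None
--
--     # Find shortest successful path
--     successful_paths = [p for p in paths if len(p) > 0 and p[-1] == p[0] or
--                        (len(p) > 1 and p[-1] == (p[0][0] + 18, p[0][1] + 18))]
--
--     if successful_paths:
--         return min(successful_paths, key=len)
--
--     # Return longest exploration if no success
--     if paths:
--         return max(paths, key=len)
--     return None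
-- ===== SOURCE B (Python) =====
-- def _fusion_select(paths, compressed_state):
--     """FusionAlpha: sort-then-scan selection using compressed knowledge"""
--     if compressed_state is None:
--         return None
--     if not paths:
--         return None
--     # stable ascending sort by length: the first successful path encountered
--     # is the shortest successful one (earliest original position on ties)
--     for p in sorted(paths, key=len):
--         if len(p) > 0 and p[-1] == p[0] or \
--            (len(p) > 1 and p[-1] == (p[0][0] + 18, p[0][1] + 18)):
--             return p
--     # no successful path: a stable descending sort puts the longest
--     # (earliest original position on ties) first
--     return sorted(paths, key=len, reverse=True)[0]
-- ===== Notes on version B (the rewrite author's own statement) =====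
-- stated objective: alternative
-- what changed: Replaced A's filter + min(key=len) + max(key=len) passes by a sort-then-scan strategy: stable ascending sort by length and return the first successful path, else the head of a stable descending sort (stability preserves min/max first-tie semantics).
import Mathlib
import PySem

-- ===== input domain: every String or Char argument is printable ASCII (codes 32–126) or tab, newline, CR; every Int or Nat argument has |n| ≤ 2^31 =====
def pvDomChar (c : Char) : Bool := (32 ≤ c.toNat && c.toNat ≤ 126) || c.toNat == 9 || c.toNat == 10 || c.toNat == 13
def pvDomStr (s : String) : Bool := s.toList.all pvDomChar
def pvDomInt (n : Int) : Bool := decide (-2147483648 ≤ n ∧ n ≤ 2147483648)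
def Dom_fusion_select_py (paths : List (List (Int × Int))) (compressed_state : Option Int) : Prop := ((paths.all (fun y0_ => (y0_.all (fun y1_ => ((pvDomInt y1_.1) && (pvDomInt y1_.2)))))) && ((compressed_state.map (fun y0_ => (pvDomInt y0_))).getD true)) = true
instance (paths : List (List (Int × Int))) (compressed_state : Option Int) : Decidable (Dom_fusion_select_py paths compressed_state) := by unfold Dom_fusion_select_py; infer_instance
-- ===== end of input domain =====

-- B replaces A's filter/min/max passes by sort-then-scan (stable sorts by length);
-- return value only, neither version mutates its arguments.

-- shared success predicate: `len(p) > 0 and p[-1] == p[0] or (len(p) > 1 and p[-1] == (p[0][0]+18, p[0][1]+18))`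
-- (index accesses are guarded by the length tests, so Option equality via pyGet? is exact)
def pvSucc (p : List (Int × Int)) : Bool :=
  (decide (0 < p.length) && (PySem.List.pyGet? p (-1) == PySem.List.pyGet? p 0)) ||
  (decide (1 < p.length) &&
    (PySem.List.pyGet? p (-1) == (PySem.List.pyGet? p 0).map (fun h => (h.1 + 18, h.2 + 18))))

-- ===== PORT A =====
def fusion_select_py (paths : List (List (Int × Int))) (compressed_state : Option Int) : Option (List (Int × Int)) :=
  match compressed_state with
  | none => none
  | some _ =>
    let successful_paths := paths.filter pvSucc
    if successful_paths ≠ [] then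
      PySem.List.min? successful_paths (fun p => p.length)
    else if paths ≠ [] then
      PySem.List.max? paths (fun p => p.length)
    else none

-- ===== PORT B =====
def fusion_select_py_alt (paths : List (List (Int × Int))) (compressed_state : Option Int) : Option (List (Int × Int)) :=
  match compressed_state with
  | none => none
  | some _ =>
    if paths = [] then none
    else
      -- `for p in sorted(paths, key=len): if <succ>: return p`
      match (PySem.List.sorted paths (fun p => p.length)).find? pvSucc with
      | some p => some p
      | none =>
        -- `return sorted(paths, key=len, reverse=True)[0]` (paths nonempty, so [0] is the head)
        (PySem.List.sorted paths (fun p => p.length) true).head?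

-- ===== PRECONDITION & SPEC =====
def Spec_fusion_select_py (paths : List (List (Int × Int))) (compressed_state : Option Int) (out : Option (List (Int × Int))) : Prop := out = fusion_select_py_alt paths compressed_state
instance (paths : List (List (Int × Int))) (compressed_state : Option Int) (out : Option (List (Int × Int))) : Decidable (Spec_fusion_select_py paths compressed_state out) := by unfold Spec_fusion_select_py; infer_instance

-- ===== CLAIM (what is proved, stated in full; the proofs are below) =====
def Claim_equal_fusion_select_py : Prop := ∀ (paths : List (List (Int × Int))) (compressed_state : Option Int), Dom_fusion_select_py paths compressed_state → Spec_fusion_select_py paths compressed_state (fusion_select_py paths compressed_state)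

-- ===== LEMMAS AND PROOFS =====

-- one step of the running-extremum fold (min? for the ascending comparison, max? for the descending one)
def pvStep {α : Type} (lt : α → α → Bool) (o : Option α) (x : α) : Option α :=
  match o with
  | none => some x
  | some m => if lt x m then some x else some m

-- find? after a stable insertion into a lt-sorted list = one extremum step
theorem pvFindInsert {α : Type} (lt : α → α → Bool) (q : α → Bool) (x : α)
    (htrans : ∀ a b c : α, lt a b = true → lt c b = false → lt a c = true) :
    ∀ acc : List α, acc.Pairwise (fun a b => lt b a = false) →
      (PySem.List.insertBy lt x acc).find? q
        = if q x then pvStep lt (acc.find? q) x else acc.find? q := by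
  intro acc
  induction acc with
  | nil =>
    intro _
    cases hx : q x <;> simp [PySem.List.insertBy, List.find?, hx, pvStep]
  | cons a t ih =>
    intro hp
    have hpt : t.Pairwise (fun a b => lt b a = false) := hp.tail
    have hpa : ∀ y ∈ t, lt y a = false := fun y hy => List.rel_of_pairwise_cons hp hy
    cases hxa : lt x a with
    | true =>
      -- x is inserted in front
      simp only [PySem.List.insertBy, hxa, if_true]
      cases hx : q x with
      | true =>
        rw [if_pos rfl, List.find?_cons_of_pos (h := hx)]
        cases hfind : (a :: t).find? q with
        | none => simp [pvStep]
        | some m =>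
          have hm : m ∈ a :: t := List.mem_of_find?_eq_some hfind
          have hxm : lt x m = true := by
            rcases List.mem_cons.mp hm with rfl | hm'
            · exact hxa
            · exact htrans x a m hxa (hpa m hm')
          simp [pvStep, hxm]
      | false =>
        rw [if_neg (by simp), List.find?_cons_of_neg (h := by simp [hx])]
    | false =>
      -- x goes past a
      simp only [PySem.List.insertBy, hxa, Bool.false_eq_true, if_false]
      cases ha : q a with
      | true =>
        rw [List.find?_cons_of_pos (h := ha), List.find?_cons_of_pos (h := ha)]
        cases hx : q x <;> simp [pvStep, hxa]
      | false =>
        rw [List.find?_cons_of_neg (h := by simp [ha]), List.find?_cons_of_neg (h := by simp [ha])]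
        exact ih hpt

-- insertion keeps the list lt-sorted
theorem pvPairwiseInsert {α : Type} (lt : α → α → Bool) (x : α)
    (hasym : ∀ a b : α, lt a b = true → lt b a = false)
    (htrans : ∀ a b c : α, lt a b = true → lt c b = false → lt a c = true) :
    ∀ acc : List α, acc.Pairwise (fun a b => lt b a = false) →
      (PySem.List.insertBy lt x acc).Pairwise (fun a b => lt b a = false) := by
  intro acc
  induction acc with
  | nil => intro _; simp [PySem.List.insertBy]
  | cons a t ih =>
    intro hp
    have hpt : t.Pairwise (fun a b => lt b a = false) := hp.tail
    have hpa : ∀ y ∈ t, lt y a = false := fun y hy => List.rel_of_pairwise_cons hp hy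
    by_cases hxa : lt x a = true
    · simp only [PySem.List.insertBy, hxa, if_true]
      refine List.Pairwise.cons ?_ hp
      intro y hy
      rcases List.mem_cons.mp hy with rfl | hy'
      · exact hasym x y hxa
      · exact hasym x y (htrans x a y hxa (hpa y hy'))
    · simp only [PySem.List.insertBy, hxa, if_false, Bool.false_eq_true]
      refine List.Pairwise.cons ?_ (ih hpt)
      intro y hy
      rcases (PySem.List.mem_insertBy lt x y t).mp hy with rfl | hy'
      · exact Bool.eq_false_iff.mpr hxa
      · exact hpa y hy'

-- find? over the insertion-sort fold = running-extremum fold over the q-filtered input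
theorem pvMain {α : Type} (lt : α → α → Bool) (q : α → Bool)
    (hasym : ∀ a b : α, lt a b = true → lt b a = false)
    (htrans : ∀ a b c : α, lt a b = true → lt c b = false → lt a c = true) :
    ∀ xs acc : List α, acc.Pairwise (fun a b => lt b a = false) →
      ((xs.foldl (fun acc x => PySem.List.insertBy lt x acc) acc).find? q)
        = (xs.filter q).foldl (pvStep lt) (acc.find? q) := by
  intro xs
  induction xs with
  | nil => intro acc _; rfl
  | cons x t ih =>
    intro acc hp
    have h1 := ih (PySem.List.insertBy lt x acc) (pvPairwiseInsert lt x hasym htrans acc hp)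
    rw [List.foldl_cons, h1, pvFindInsert lt q x htrans acc hp]
    by_cases hx : q x = true <;> simp [hx]

-- comparison facts for the length key
theorem pvLtAsymA : ∀ a b : List (Int × Int),
    (decide (a.length < b.length)) = true → (decide (b.length < a.length)) = false := by
  intro a b h; simp at *; omega
theorem pvLtTransA : ∀ a b c : List (Int × Int),
    (decide (a.length < b.length)) = true → (decide (c.length < b.length)) = false →
    (decide (a.length < c.length)) = true := by
  intro a b c h1 h2; simp at *; omega
theorem pvLtAsymD : ∀ a b : List (Int × Int),
    (decide (b.length < a.length)) = true → (decide (a.length < b.length)) = false := by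
  intro a b h; simp at *; omega
theorem pvLtTransD : ∀ a b c : List (Int × Int),
    (decide (b.length < a.length)) = true → (decide (b.length < c.length)) = false →
    (decide (c.length < a.length)) = true := by
  intro a b c h1 h2; simp at *; omega

-- the ascending scan finds exactly min(successful, key=len)
theorem pvFindAsc (paths : List (List (Int × Int))) :
    (PySem.List.sorted paths (fun p => p.length)).find? pvSucc
      = PySem.List.min? (paths.filter pvSucc) (fun p => p.length) := by
  rw [PySem.List.sorted_eq_foldl_insertBy,
      pvMain (fun a b => decide (a.length < b.length)) pvSucc pvLtAsymA pvLtTransA paths []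
        List.Pairwise.nil]
  unfold PySem.List.min?
  congr 1
  funext o p
  cases o with
  | none => rfl
  | some m => simp [pvStep]

-- the head of the stable descending sort is exactly max(paths, key=len)
theorem pvHeadDesc (paths : List (List (Int × Int))) :
    (PySem.List.sorted paths (fun p => p.length) true).head?
      = PySem.List.max? paths (fun p => p.length) := by
  have hfind : ∀ ys : List (List (Int × Int)), ys.head? = ys.find? (fun _ => true) := by
    intro ys; cases ys <;> simp [List.find?]
  rw [hfind, PySem.List.sorted_rev_eq_foldl_insertBy,
      pvMain (fun a b => decide (b.length < a.length)) (fun _ => true) pvLtAsymD pvLtTransD paths []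
        List.Pairwise.nil]
  unfold PySem.List.max?
  simp only [List.filter_true]
  congr 1
  funext o p
  cases o with
  | none => rfl
  | some m => simp [pvStep]

theorem fusion_select_py_spec_aux (paths : List (List (Int × Int))) (cs : Option Int) :
    fusion_select_py paths cs = fusion_select_py_alt paths cs := by
  cases cs with
  | none => rfl
  | some c =>
    simp only [fusion_select_py, fusion_select_py_alt, pvFindAsc, pvHeadDesc]
    by_cases hp : paths = []
    · subst hp; rfl
    · simp only [hp, if_false, ne_eq, not_false_eq_true, if_true]
      cases hmin : PySem.List.min? (paths.filter pvSucc) (fun p => p.length) with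
      | none =>
        have hf : paths.filter pvSucc = [] :=
          (PySem.List.min?_eq_none_iff (xs := paths.filter pvSucc) (key := fun p => p.length)).mp hmin
        simp [hf]
      | some m =>
        have hf : paths.filter pvSucc ≠ [] := by
          intro h
          rw [h] at hmin
          simp [PySem.List.min?] at hmin
        simp [hf]

-- ===== VERDICT (by name: the statement is the Claim_ definition above) =====
theorem fusion_select_py_spec : Claim_equal_fusion_select_py := by
  intro paths cs _
  exact fusion_select_py_spec_aux paths cs
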